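-- pv_equiv track=rewrite | github.com/DK8DE/RotorTcpBridge | rotortcpbridge/udp_aswatchlist.py | _strip_leading_quoted_tokens
-- ===== SOURCE A (Python) =====
-- def _strip_leading_quoted_tokens(s: str) -> str:
--     """
--     Entfernt führende ``\"…\"``-Blöcke (AirScout-Präfixe, z. B. PY/AS).
--
--     Inhalt und Anzahl können variieren; für die Karte zählt nur das CSV danach.
--     """
--     s = s.strip()
--     while s.startswith('"'):
--         end = s.find('"', 1)
--         if end == -1:
--             break
--         s = s[end + 1 :].strip()
--     return s
-- ===== SOURCE B (Python) =====
-- def _strip_leading_quoted_tokens(s: str) -> str: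
--     t = s.strip()
--     i = 0
--     while i < len(t) and t[i] == '"':
--         j = t.find('"', i + 1)
--         if j == -1:
--             break
--         i = j + 1
--         while i < len(t) and t[i].isspace():
--             i += 1
--     return t[i:]
-- ===== Notes on version B (the rewrite author's own statement) =====
-- stated objective: alternative
-- what changed: A repeatedly slices off each quoted block and re-strips the shrinking tail string; B strips once and advances a single integer index over the fixed string (find for the closing quote, an isspace loop for the gap), returning one final slice.
import Mathlib
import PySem

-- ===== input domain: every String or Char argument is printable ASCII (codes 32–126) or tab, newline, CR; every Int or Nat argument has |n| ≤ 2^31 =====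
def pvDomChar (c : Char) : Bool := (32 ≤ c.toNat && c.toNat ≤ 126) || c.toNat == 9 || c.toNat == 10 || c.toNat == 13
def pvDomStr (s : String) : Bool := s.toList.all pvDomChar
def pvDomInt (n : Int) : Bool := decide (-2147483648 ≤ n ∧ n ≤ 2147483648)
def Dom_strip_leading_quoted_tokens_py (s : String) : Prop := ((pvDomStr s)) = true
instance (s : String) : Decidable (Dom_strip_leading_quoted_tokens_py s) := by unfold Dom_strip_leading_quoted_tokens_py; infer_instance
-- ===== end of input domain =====

-- B strips once and walks a single integer index forward (find + isspace skip), instead of A's repeated slice-and-restrip of the shrinking tail: an alternative decomposition of the same task.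

-- ===== PORT A =====
-- termination fact the port cites: each loop iteration removes at least the leading quote pair
theorem pvStripLenLe (cs : List Char) : (PySem.Chars.strip cs).length ≤ cs.length := by
  simp only [PySem.Chars.strip, PySem.Chars.rstrip, PySem.Chars.lstrip, List.length_reverse]
  exact le_trans (List.length_dropWhile_le _ _)
    (by simpa using List.length_dropWhile_le PySem.Chars.isspace cs)

theorem pvFindFromOne (cs : List Char) (h : 1 ≤ cs.length) :
    PySem.Chars.findFrom cs ['"'] 1 =
      if PySem.Chars.find (cs.drop 1) ['"'] = -1 then -1
      else 1 + PySem.Chars.find (cs.drop 1) ['"'] := by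
  have := PySem.Chars.findFrom_natCast cs ['"'] 1 h
  simpa using this

-- the while loop of A; cs is the current (already stripped) string
def strip_leading_quoted_tokens_go (cs : List Char) : List Char :=
  if PySem.Chars.startswith cs ['"'] then
    let e := PySem.Chars.findFrom cs ['"'] 1
    if e = -1 then cs
    else strip_leading_quoted_tokens_go (PySem.Chars.strip (PySem.List.slice cs (some (e + 1)) none))
  else cs
termination_by cs.length
decreasing_by
  rename_i hstart hne
  have hne' : ¬ PySem.Chars.findFrom cs ['"'] 1 = -1 := hne
  have hpre : ['"'] <+: cs := (PySem.Chars.startswith_iff cs ['"']).mp hstart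
  have hlen : 1 ≤ cs.length := by
    have := hpre.length_le; simpa using this
  rw [pvFindFromOne cs hlen] at hne' ⊢
  split at hne'
  · exact absurd rfl hne'
  · rename_i hf
    have hf0 : 0 ≤ PySem.Chars.find (cs.drop 1) ['"'] := by
      have := PySem.Chars.neg_one_le_find (cs.drop 1) ['"']; omega
    rw [if_neg hf]
    rw [PySem.List.slice_from cs (by omega : (0:Int) ≤ 1 + PySem.Chars.find (cs.drop 1) ['"'] + 1)]
    calc (PySem.Chars.strip (List.drop (1 + PySem.Chars.find (cs.drop 1) ['"'] + 1).toNat cs)).length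
        ≤ (List.drop (1 + PySem.Chars.find (cs.drop 1) ['"'] + 1).toNat cs).length := pvStripLenLe _
      _ < cs.length := by
          rw [List.length_drop]; omega

def strip_leading_quoted_tokens_py (s : String) : String :=
  String.ofList (strip_leading_quoted_tokens_go (PySem.Chars.strip s.toList))

-- ===== PORT B =====
-- the inner "skip whitespace" while loop of B
def pvSkipWs (t : List Char) (i : Nat) : Nat :=
  if h : i < t.length then
    if PySem.Chars.isspace t[i] then pvSkipWs t (i + 1) else i
  else i
termination_by t.length - i

-- facts the port of B cites for termination
theorem pvSkipWs_ge (t : List Char) (i : Nat) : i ≤ pvSkipWs t i := by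
  fun_induction pvSkipWs t i with
  | case1 i h hs ih => omega
  | case2 i h hs => omega
  | case3 i h => omega

theorem pvFindFromGe (t : List Char) (i : Nat) (hi : i < t.length)
    (h2 : PySem.Chars.findFrom t ['"'] ((i : Int) + 1) ≠ -1) :
    (i : Int) + 1 ≤ PySem.Chars.findFrom t ['"'] ((i : Int) + 1) := by
  have hc : ((i : Int) + 1) = ((i + 1 : Nat) : Int) := by push_cast; ring
  rw [hc, PySem.Chars.findFrom_natCast t ['"'] (i + 1) (by omega)] at h2 ⊢
  split at h2
  · exact absurd rfl h2
  · rename_i hf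
    split
    · rename_i hf'; exact absurd hf' hf
    · have := PySem.Chars.neg_one_le_find (t.drop (i + 1)) ['"']; omega

-- the main while loop of B: t is the stripped input, i the current index
def strip_leading_quoted_tokens_alt_go (t : List Char) (i : Nat) : List Char :=
  if h : t[i]? = some '"' then
    let j := PySem.Chars.findFrom t ['"'] ((i : Int) + 1)
    if hj : j = -1 then t.drop i
    else strip_leading_quoted_tokens_alt_go t (pvSkipWs t (j.toNat + 1))
  else t.drop i
termination_by t.length - i
decreasing_by
  have hi : i < t.length := (List.getElem?_eq_some_iff.mp h).1
  have hge := pvFindFromGe t i hi hj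
  have hsk := pvSkipWs_ge t ((PySem.Chars.findFrom t ['"'] ((i : Int) + 1)).toNat + 1)
  omega

def strip_leading_quoted_tokens_py_alt (s : String) : String :=
  String.ofList (strip_leading_quoted_tokens_alt_go (PySem.Chars.strip s.toList) 0)

-- ===== PRECONDITION & SPEC =====
def Spec_strip_leading_quoted_tokens_py (s : String) (out : String) : Prop := out = strip_leading_quoted_tokens_py_alt s
instance (s : String) (out : String) : Decidable (Spec_strip_leading_quoted_tokens_py s out) := by unfold Spec_strip_leading_quoted_tokens_py; infer_instance

-- ===== CLAIM (what is proved, stated in full; the proofs are below) =====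
def Claim_equal_strip_leading_quoted_tokens_py : Prop := ∀ (s : String), Dom_strip_leading_quoted_tokens_py s → Spec_strip_leading_quoted_tokens_py s (strip_leading_quoted_tokens_py s)

-- ===== LEMMAS AND PROOFS =====

-- dropWhile is transported along prefixes on which it is the identity
theorem pvDWPrefix (p : Char → Bool) (y x : List Char) (h : y <+: x)
    (hx : List.dropWhile p x = x) : List.dropWhile p y = y := by
  rw [List.dropWhile_eq_self_iff] at hx ⊢
  intro hl
  have hlx : 0 < x.length := lt_of_lt_of_le hl h.length_le
  have hg := h.getElem hl
  rw [hg]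
  exact hx hlx

theorem pvRstripSuffix (y x : List Char) (h : y <:+ x)
    (hx : PySem.Chars.rstrip x = x) : PySem.Chars.rstrip y = y := by
  have hx' : List.dropWhile PySem.Chars.isspace x.reverse = x.reverse := by
    have := congrArg List.reverse hx
    simpa [PySem.Chars.rstrip] using this
  have hpre : y.reverse <+: x.reverse := List.reverse_prefix.mpr h
  have := pvDWPrefix PySem.Chars.isspace y.reverse x.reverse hpre hx'
  simp [PySem.Chars.rstrip, this]

theorem pvRstripStrip (cs : List Char) :
    PySem.Chars.rstrip (PySem.Chars.strip cs) = PySem.Chars.strip cs := by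
  simp [PySem.Chars.strip, PySem.Chars.rstrip, List.dropWhile_idempotent]

theorem pvLstripStrip (cs : List Char) :
    List.dropWhile PySem.Chars.isspace (PySem.Chars.strip cs) = PySem.Chars.strip cs := by
  have hsuf : List.dropWhile PySem.Chars.isspace (PySem.Chars.lstrip cs).reverse <:+ (PySem.Chars.lstrip cs).reverse :=
    List.dropWhile_suffix _
  have hpre : PySem.Chars.strip cs <+: PySem.Chars.lstrip cs := by
    have := List.reverse_prefix.mpr hsuf
    simpa [PySem.Chars.strip, PySem.Chars.rstrip] using this
  exact pvDWPrefix _ _ _ hpre (by simp [PySem.Chars.lstrip, List.dropWhile_idempotent])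

-- B's whitespace-skip index is A's lstrip of the tail
theorem pvDropSkipWs (t : List Char) (i : Nat) :
    t.drop (pvSkipWs t i) = List.dropWhile PySem.Chars.isspace (t.drop i) := by
  fun_induction pvSkipWs t i with
  | case1 i h hs ih =>
      rw [ih, List.drop_eq_getElem_cons h, List.dropWhile_cons_of_pos hs]
  | case2 i h hs =>
      rw [List.drop_eq_getElem_cons h, List.dropWhile_cons_of_neg hs]
  | case3 i h =>
      rw [List.drop_eq_nil_of_le (by omega)]
      simp

theorem pvStartswithQuote (cs : List Char) :
    PySem.Chars.startswith cs ['"'] = true ↔ cs.head? = some '"' := by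
  rw [PySem.Chars.startswith_iff]
  cases cs with
  | nil => simp
  | cons c r =>
      constructor
      · intro h
        rcases h with ⟨u, hu⟩
        cases hu
        simp
      · intro h
        simp at h
        exact ⟨r, by simp [h]⟩

-- the core loop correspondence: A's loop on the tail t.drop i equals B's loop at index i
theorem pvMain (t : List Char) (ht : PySem.Chars.rstrip t = t) :
    ∀ n i, t.length - i ≤ n →
      List.dropWhile PySem.Chars.isspace (t.drop i) = t.drop i →
      strip_leading_quoted_tokens_go (t.drop i) = strip_leading_quoted_tokens_alt_go t i := by
  intro n
  induction n with
  | zero =>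
      intro i hn hws
      have hnil : t.drop i = [] := List.drop_eq_nil_of_le (by omega)
      rw [strip_leading_quoted_tokens_go.eq_def, strip_leading_quoted_tokens_alt_go.eq_def]
      have : t[i]? = none := List.getElem?_eq_none (by omega)
      rw [this]
      simp [hnil, PySem.Chars.startswith]
  | succ n ih =>
      intro i hn hws
      rw [strip_leading_quoted_tokens_go.eq_def, strip_leading_quoted_tokens_alt_go.eq_def]
      by_cases hq : t[i]? = some '"'
      · have hi : i < t.length := (List.getElem?_eq_some_iff.mp hq).1
        have hstart : PySem.Chars.startswith (t.drop i) ['"'] = true := by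
          rw [pvStartswithQuote, List.head?_drop, hq]
        rw [if_pos hstart, dif_pos hq]
        have hdd : (t.drop i).drop 1 = t.drop (i + 1) := by
          rw [List.drop_drop]
        have hlen1 : 1 ≤ (t.drop i).length := by rw [List.length_drop]; omega
        have hcast : ((i : Int) + 1) = ((i + 1 : Nat) : Int) := by push_cast; ring
        rw [pvFindFromOne (t.drop i) hlen1, hdd, hcast,
          PySem.Chars.findFrom_natCast t ['"'] (i + 1) (by omega)]
        set f := PySem.Chars.find (t.drop (i + 1)) ['"'] with hfdef
        by_cases hf : f = -1
        · simp [hf]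
        · have hf0 : 0 ≤ f := by
            have := PySem.Chars.neg_one_le_find (t.drop (i + 1)) ['"']
            rw [← hfdef] at this; omega
          rw [if_neg hf, if_neg hf]
          have h1 : ¬ (1 + f = -1) := by omega
          have h2 : ¬ ((i + 1 : Nat) : Int) + f = -1 := by omega
          rw [if_neg h1, dif_neg h2]
          -- identify A's recursive argument with t.drop i', i' = pvSkipWs t (j.toNat + 1)
          have hslice : PySem.List.slice (t.drop i) (some (1 + f + 1)) none
              = t.drop ((((i + 1 : Nat) : Int) + f).toNat + 1) := by
            rw [PySem.List.slice_from (t.drop i) (by omega : (0:Int) ≤ 1 + f + 1), List.drop_drop]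
            congr 1
            omega
          rw [hslice]
          set k := (((i + 1 : Nat) : Int) + f).toNat + 1 with hkdef
          have hstrip : PySem.Chars.strip (t.drop k) = t.drop (pvSkipWs t k) := by
            have hl : PySem.Chars.lstrip (t.drop k) = t.drop (pvSkipWs t k) :=
              (pvDropSkipWs t k).symm
            rw [PySem.Chars.strip, hl]
            exact pvRstripSuffix _ t (List.drop_suffix _ _) ht
          rw [hstrip]
          apply ih
          · have hk2 : i + 2 ≤ k := by omega
            have := pvSkipWs_ge t k
            omega
          · rw [pvDropSkipWs t k]
            exact List.dropWhile_idempotent _ _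
      · have hstart : ¬ PySem.Chars.startswith (t.drop i) ['"'] = true := by
          rw [pvStartswithQuote, List.head?_drop]
          simpa using hq
        rw [if_neg hstart, dif_neg hq]

-- ===== VERDICT (by name: the statement is the Claim_ definition above) =====
theorem strip_leading_quoted_tokens_py_spec : Claim_equal_strip_leading_quoted_tokens_py := by
  intro s _
  unfold Spec_strip_leading_quoted_tokens_py
  unfold strip_leading_quoted_tokens_py strip_leading_quoted_tokens_py_alt
  congr 1
  have := pvMain (PySem.Chars.strip s.toList) (pvRstripStrip s.toList)
    ((PySem.Chars.strip s.toList).length) 0 (by omega)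
    (by simpa using pvLstripStrip s.toList)
  simpa using this
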